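-- pv_equiv track=rewrite | github.com/clxxrlove/algorithm-study-py | programmers/2024-kakao-internship/3.py | solution
-- ===== SOURCE A (Python) =====
-- from itertools import combinations, product, permutations
--
-- def solution(dice):
--     length = len(dice)
--     comb = list(combinations(range(length), length // 2))
--     wins = [0] * len(comb)
--
--     for index, c in enumerate(comb):
--         my_dice = []
--         enemy_dice = []
--         for i in range(length):
--             if i in c:
--                 my_dice.append(dice[i])
--             else:
--                 enemy_dice.append(dice[i])
--
--         my_score = dict()
--         enemy_score = dict()
--
--         for my in list(map(sum, product(*my_dice))):
--             if my not in my_score: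
--                 my_score[my] = 1
--             else:
--                 my_score[my] += 1
--
--         for enemy in list(map(sum, product(*enemy_dice))):
--             if enemy not in enemy_score:
--                 enemy_score[enemy] = 1
--             else:
--                 enemy_score[enemy] += 1
--
--         for my_result in my_score.items():
--             for enemy_result in enemy_score.items():
--                 if my_result[0] > enemy_result[0]:
--                     wins[index] += my_result[1] * enemy_result[1]
--
--     ans = list(map(lambda x: x + 1, comb[wins.index(max(wins))]))
--     return ans
-- ===== SOURCE B (Python) =====
-- from itertools import combinations
--
-- def solution(dice):
--     n = len(dice)
--     best_wins = -1
--     best_c = ()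
--     for c in combinations(range(n), n // 2):
--         sel = set(c)
--         # sums of each half by incremental convolution instead of product()
--         my = [0]
--         enemy = [0]
--         for i, d in enumerate(dice):
--             if i in sel:
--                 my = [s + f for s in my for f in d]
--             else:
--                 enemy = [s + f for s in enemy for f in d]
--         enemy.sort()
--         w = 0
--         for m in my:
--             # hand-rolled bisect_left: number of enemy sums < m
--             lo, hi = 0, len(enemy)
--             while lo < hi:
--                 mid = (lo + hi) // 2
--                 if enemy[mid] < m:
--                     lo = mid + 1
--                 else:
--                     hi = mid
--             w += lo
--         if w > best_wins:
--             best_wins = w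
--             best_c = c
--     return [i + 1 for i in best_c]
-- ===== Notes on version B (the rewrite author's own statement) =====
-- stated objective: alternative
-- what changed: Per combination, B builds each half's sums by incremental convolution (instead of materialising product() tuples), sorts the enemy sums once and counts wins with a binary search per my-sum, tracking the running first-argmax combination instead of building counter dicts, a quadratic items-by-items double loop, a wins list and index(max).
import Mathlib
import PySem

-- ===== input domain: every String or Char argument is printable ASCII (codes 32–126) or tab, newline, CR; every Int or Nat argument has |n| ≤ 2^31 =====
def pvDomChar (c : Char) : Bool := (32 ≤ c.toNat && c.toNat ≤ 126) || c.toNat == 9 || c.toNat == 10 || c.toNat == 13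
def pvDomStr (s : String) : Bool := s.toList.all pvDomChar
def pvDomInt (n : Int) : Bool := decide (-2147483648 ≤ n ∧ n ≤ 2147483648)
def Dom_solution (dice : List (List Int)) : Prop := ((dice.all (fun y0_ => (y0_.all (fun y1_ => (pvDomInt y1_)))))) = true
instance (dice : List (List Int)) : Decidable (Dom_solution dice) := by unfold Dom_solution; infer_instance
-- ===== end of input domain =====

-- B replaces A's per-combination product() enumeration + counter-dict double loop + wins list with
-- incremental sum convolution, a sorted enemy list scanned by binary search, and a running argmax.

-- ===== PORT A =====

-- itertools.product(*ds) as a list of tuples (lists)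
def pyProdA : List (List Int) → List (List Int)
  | [] => [[]]
  | d :: ds => d.flatMap (fun f => (pyProdA ds).map (fun t => f :: t))

-- the `for i in range(length): if i in c: my.append(...) else: enemy.append(...)` loop
def splitDiceA (dice : List (List Int)) (c : List Int) : List (List Int) × List (List Int) :=
  (PySem.List.pyRange 0 (dice.length : Int) 1).foldl
    (fun (p : List (List Int) × List (List Int)) i =>
      if c.contains i then (p.1 ++ [PySem.List.pyGetD dice i []], p.2)
      else (p.1, p.2 ++ [PySem.List.pyGetD dice i []]))
    ([], [])

-- the `if s not in score: score[s] = 1 else: score[s] += 1` loop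
def buildScoreA (sums : List Int) : PySem.Dict Int Int :=
  sums.foldl
    (fun d s => if d.contains s then d.modify s 0 (· + 1) else d.insert s 1)
    PySem.Dict.empty

-- the double loop over my_score.items() × enemy_score.items()
def winCountA (myScore enemyScore : PySem.Dict Int Int) : Int :=
  myScore.items.foldl
    (fun w mr =>
      enemyScore.items.foldl
        (fun w er => if mr.1 > er.1 then w + mr.2 * er.2 else w) w)
    0

def solution (dice : List (List Int)) : List Int :=
  let comb := PySem.List.combinations (PySem.List.pyRange 0 (dice.length : Int) 1) (dice.length / 2)
  let wins := comb.map (fun c =>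
    let p := splitDiceA dice c
    let myScore := buildScoreA ((pyProdA p.1).map (fun t => t.sum))
    let enemyScore := buildScoreA ((pyProdA p.2).map (fun t => t.sum))
    winCountA myScore enemyScore)
  match PySem.List.max? wins (fun x => x) with
  | none => []
  | some mx =>
    match PySem.List.index? wins mx with
    | none => []
    | some i => (PySem.List.pyGetD comb (i : Int) []).map (fun x => x + 1)

-- ===== PORT B =====

-- per-combination win count: convolved sums, enemy sorted, binary search (B's hand-rolled
-- bisect_left loop is exactly PySem.List.bisectLeft's lo/hi loop)
def winCountB (dice : List (List Int)) (c : List Int) : Int :=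
  let sel := PySem.Set.ofList c
  let p := (PySem.List.enumerate dice 0).foldl
    (fun (p : List Int × List Int) q =>
      if PySem.Set.contains sel q.1 then
        (p.1.flatMap (fun s => q.2.map (fun f => s + f)), p.2)
      else
        (p.1, p.2.flatMap (fun s => q.2.map (fun f => s + f))))
    ([0], [0])
  let enemy := PySem.List.sorted p.2 (fun x => x)
  p.1.foldl (fun w m => w + (PySem.List.bisectLeft enemy m : Int)) 0

def solution_alt (dice : List (List Int)) : List Int :=
  let best := (PySem.List.combinations (PySem.List.pyRange 0 (dice.length : Int) 1) (dice.length / 2)).foldl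
    (fun (b : Int × List Int) c =>
      let w := winCountB dice c
      if w > b.1 then (w, c) else b)
    (-1, [])
  best.2.map (fun i => i + 1)

-- ===== PRECONDITION & SPEC =====
def Spec_solution (dice : List (List Int)) (out : List Int) : Prop := out = solution_alt dice
instance (dice : List (List Int)) (out : List Int) : Decidable (Spec_solution dice out) := by unfold Spec_solution; infer_instance

-- ===== CLAIM (what is proved, stated in full; the proofs are below) =====
def Claim_equal_solution : Prop := ∀ (dice : List (List Int)), Dom_solution dice → Spec_solution dice (solution dice)

-- ===== LEMMAS AND PROOFS =====


-- sum-convolution helpers shared by both directions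
def stepS (sums : List Int) (d : List Int) : List Int :=
  sums.flatMap (fun s => d.map (fun f => s + f))

def SumsR (ds : List (List Int)) : List Int := (pyProdA ds).map (fun t => t.sum)

def selDice (dice : List (List Int)) (c : List Int) : List (List Int) :=
  ((PySem.List.enumerate dice 0).filter (fun p => c.contains p.1)).map (fun p => p.2)

def unselDice (dice : List (List Int)) (c : List Int) : List (List Int) :=
  ((PySem.List.enumerate dice 0).filter (fun p => !c.contains p.1)).map (fun p => p.2)

theorem lem_sumsR_nil : SumsR [] = [0] := rfl

theorem lem_sumsR_cons (d : List Int) (ds : List (List Int)) :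
    SumsR (d :: ds) = d.flatMap (fun f => (SumsR ds).map (fun s => f + s)) := by
  simp [SumsR, pyProdA, List.map_flatMap, Function.comp_def, List.map_map]

theorem lem_foldl_stepS (ds : List (List Int)) (acc : List Int) :
    ds.foldl stepS acc = acc.flatMap (fun s => (SumsR ds).map (fun x => s + x)) := by
  induction ds generalizing acc with
  | nil => simp [lem_sumsR_nil]
  | cons d ds ih =>
    rw [List.foldl_cons, ih, lem_sumsR_cons]
    simp [stepS, List.flatMap_assoc, List.map_flatMap, List.flatMap_map, List.map_map,
      Function.comp_def, add_assoc]

theorem lem_sumsDP (ds : List (List Int)) : List.foldl stepS [0] ds = SumsR ds := by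
  rw [lem_foldl_stepS]
  simp

theorem lem_split_pair {α β : Type} (l : List α) (q : α → Bool) (h : α → β) (a b : List β) :
    l.foldl (fun p x => if q x then (p.1 ++ [h x], p.2) else (p.1, p.2 ++ [h x])) (a, b)
      = (a ++ (l.filter q).map h, b ++ (l.filter (fun x => !q x)).map h) := by
  induction l generalizing a b with
  | nil => simp
  | cons x l ih =>
    by_cases hx : q x <;> simp [hx, ih]

theorem lem_fold_pair_filter {α β : Type} (l : List α) (q : α → Bool) (g : β → α → β) (a b : β) :
    l.foldl (fun p x => if q x then (g p.1 x, p.2) else (p.1, g p.2 x)) (a, b)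
      = ((l.filter q).foldl g a, (l.filter (fun x => !q x)).foldl g b) := by
  induction l generalizing a b with
  | nil => simp
  | cons x l ih =>
    by_cases hx : q x <;> simp [hx, ih]

theorem lem_foldl_add {α : Type} (l : List α) (g : α → Int) (a : Int) :
    l.foldl (fun w x => w + g x) a = a + (l.map g).sum := by
  induction l generalizing a with
  | nil => simp
  | cons x l ih => simp [ih, add_assoc]

theorem lem_foldl_if_add {α : Type} (l : List α) (p : α → Prop) [DecidablePred p]
    (g : α → Int) (a : Int) :
    l.foldl (fun w x => if p x then w + g x else w) a
      = a + (l.map (fun x => if p x then g x else 0)).sum := by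
  induction l generalizing a with
  | nil => simp
  | cons x l ih =>
    by_cases hx : p x <;> simp [hx, ih, add_assoc]

theorem lem_buildScoreA (L : List Int) : buildScoreA L = PySem.Dict.counter L := by
  rw [PySem.Dict.counter_eq_foldl]
  unfold buildScoreA
  congr 1
  funext d s
  by_cases h : d.contains s
  · simp [h]
  · simp only [Bool.not_eq_true] at h
    simp [h, PySem.Dict.modify, PySem.Dict.getD_of_not_contains _ _ h]

theorem lem_toFinset_ofList (L : List Int) :
    (PySem.Set.ofList L).toFinset = L.toFinset := by
  ext x
  simp [PySem.Set.mem_ofList]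

theorem lem_counter_weighted_sum (L : List Int) (g : Int → Int) :
    ((PySem.Set.ofList L).map (fun k => (L.count k : Int) * g k)).sum = (L.map g).sum := by
  rw [Finset.sum_list_map_count L g]
  have h2 : (List.map (fun k => (List.count k L : Int) * g k) (PySem.Set.ofList L)).sum
      = (List.map (fun m => List.count m L • g m) (PySem.Set.ofList L)).sum := by
    simp
  rw [h2, ← List.sum_toFinset (fun m => List.count m L • g m) (PySem.Set.nodup_ofList L),
    lem_toFinset_ofList]

theorem lem_winCountA (LM LE : List Int) :
    winCountA (buildScoreA LM) (buildScoreA LE)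
      = (LM.map (fun m => ((LE.countP (fun e => e < m)) : Int))).sum := by
  unfold winCountA
  rw [lem_buildScoreA, lem_buildScoreA, PySem.Dict.items_counter, PySem.Dict.items_counter]
  rw [List.foldl_map]
  have hstep : (fun (w : Int) (k : Int) =>
        List.foldl (fun w er => if (k, (LM.count k : Int)).1 > er.1
            then w + (k, (LM.count k : Int)).2 * er.2 else w) w
          (List.map (fun k => (k, (LE.count k : Int))) (PySem.Set.ofList LE)))
      = fun (w : Int) (k : Int) =>
        w + (LM.count k : Int) * ((LE.countP (fun e => e < k)) : Int) := by
    funext w k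
    rw [List.foldl_map, lem_foldl_if_add]
    congr 1
    have hfac : (List.map (fun k' => if (k, (LM.count k : Int)).1 > (k', (LE.count k' : Int)).1
          then (k, (LM.count k : Int)).2 * (k', (LE.count k' : Int)).2 else 0)
          (PySem.Set.ofList LE)).sum
        = (LM.count k : Int) *
          (List.map (fun k' => (LE.count k' : Int) * (if k' < k then 1 else 0))
            (PySem.Set.ofList LE)).sum := by
      rw [← List.sum_map_mul_left]
      congr 1
      apply List.map_congr_left
      intro k' _
      by_cases hlt : k' < k
      · simp [hlt, gt_iff_lt]
      · simp [hlt, gt_iff_lt]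
    rw [hfac, lem_counter_weighted_sum LE (fun e => if e < k then 1 else 0)]
    congr 1
    have := PySem.List.sum_map_ite_one_zero (fun e => decide (e < k)) LE
    simpa using this
  rw [hstep, lem_foldl_add, zero_add,
    lem_counter_weighted_sum LM (fun m => ((LE.countP (fun e => e < m)) : Int))]

theorem lem_le_foldl_max (l : List Int) (b : Int) : b ≤ l.foldl max b := by
  induction l generalizing b with
  | nil => simp
  | cons x l ih => exact le_trans (le_max_left b x) (ih (max b x))

theorem lem_bisect_countP (s : List Int) (x : Int) (h : s.Pairwise (· ≤ ·)) :
    PySem.List.bisectLeft s x = s.countP (fun e => e < x) := by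
  obtain ⟨hle, hlt, hge⟩ := PySem.List.bisectLeft_spec s x h
  set r := PySem.List.bisectLeft s x with hr
  have hsplit : s = s.take r ++ s.drop r := (List.take_append_drop r s).symm
  conv_rhs => rw [hsplit]
  rw [List.countP_append]
  have h1 : (s.take r).countP (fun e => decide (e < x)) = (s.take r).length := by
    apply List.countP_eq_length.mpr
    intro y hy
    obtain ⟨j, hj, hyj⟩ := List.mem_iff_getElem.mp hy
    have hjr : j < r := by
      have := hj; rw [List.length_take] at this; omega
    have hjs : j < s.length := lt_of_lt_of_le hjr hle
    have hx := hlt j hjs hjr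
    rw [← hyj]
    simp only [List.getElem_take]
    simpa using hx
  have h2 : (s.drop r).countP (fun e => decide (e < x)) = 0 := by
    apply List.countP_eq_zero.mpr
    intro y hy
    obtain ⟨j, hj, hyj⟩ := List.mem_iff_getElem.mp hy
    have hjs : r + j < s.length := by
      have := hj; rw [List.length_drop] at this; omega
    have hx := hge (r + j) hjs (Nat.le_add_right r j)
    rw [← hyj]
    simp only [List.getElem_drop]
    simpa using not_lt.mpr hx
  rw [h1, h2, List.length_take, Nat.min_eq_left hle, Nat.add_zero]

theorem lem_set_contains (c : List Int) (x : Int) :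
    (PySem.Set.ofList c).contains x = c.contains x := by
  simp [PySem.Set.contains]

theorem lem_winCountB (dice : List (List Int)) (c : List Int) :
    winCountB dice c
      = ((SumsR (selDice dice c)).map
          (fun m => (((SumsR (unselDice dice c)).countP (fun e => e < m)) : Int))).sum := by
  unfold winCountB
  simp only [lem_set_contains]
  rw [show (fun (p : List Int × List Int) (q : Int × List Int) =>
        if c.contains q.1 = true then
          (p.1.flatMap (fun s => q.2.map (fun f => s + f)), p.2)
        else
          (p.1, p.2.flatMap (fun s => q.2.map (fun f => s + f))))
      = fun (p : List Int × List Int) (q : Int × List Int) =>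
        if (fun (q : Int × List Int) => c.contains q.1) q = true then
          ((fun a (x : Int × List Int) => stepS a x.2) p.1 q, p.2)
        else (p.1, (fun a (x : Int × List Int) => stepS a x.2) p.2 q) from rfl]
  rw [lem_fold_pair_filter (PySem.List.enumerate dice) (fun q => c.contains q.1)
    (fun a (x : Int × List Int) => stepS a x.2) [0] [0]]
  have hs1 : ∀ (l : List (Int × List Int)),
      l.foldl (fun a (x : Int × List Int) => stepS a x.2) [0] = SumsR (l.map (fun p => p.2)) := by
    intro l
    rw [← lem_sumsDP, List.foldl_map]
  rw [hs1, hs1]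
  rw [lem_foldl_add, zero_add]
  apply congrArg
  apply List.map_congr_left
  intro m _
  have hpw : (PySem.List.sorted (SumsR ((List.filter (fun x => !c.contains x.1)
        (PySem.List.enumerate dice 0)).map (fun p => p.2))) (fun x => x)).Pairwise (· ≤ ·) := by
    have := PySem.List.sorted_pairwise (SumsR ((List.filter (fun x => !c.contains x.1)
        (PySem.List.enumerate dice 0)).map (fun p => p.2))) (fun x => x)
    simpa using this
  rw [lem_bisect_countP _ m hpw]
  rw [List.Perm.countP_eq _ (PySem.List.sorted_perm _ _ _)]
  rfl

theorem lem_splitDiceA (dice : List (List Int)) (c : List Int) :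
    splitDiceA dice c = (selDice dice c, unselDice dice c) := by
  unfold splitDiceA
  have he := PySem.List.enumerate_eq_map_pyRange dice ([] : List Int)
  rw [PySem.List.len_eq] at he
  have h1 : (PySem.List.pyRange 0 (dice.length : Int) 1).foldl
      (fun (p : List (List Int) × List (List Int)) i =>
        if c.contains i then (p.1 ++ [PySem.List.pyGetD dice i []], p.2)
        else (p.1, p.2 ++ [PySem.List.pyGetD dice i []]))
      ([], [])
      = ((PySem.List.pyRange 0 (dice.length : Int) 1).map
          (fun j => (j, PySem.List.pyGetD dice j []))).foldl
        (fun (p : List (List Int) × List (List Int)) (q : Int × List Int) =>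
          if c.contains q.1 then (p.1 ++ [q.2], p.2) else (p.1, p.2 ++ [q.2]))
        ([], []) := by
    rw [List.foldl_map]
  rw [h1, ← he, lem_split_pair]
  simp [selDice, unselDice]

theorem lem_winA_eq_winB (dice : List (List Int)) (c : List Int) :
    (let p := splitDiceA dice c
     winCountA (buildScoreA ((pyProdA p.1).map (fun t => t.sum)))
       (buildScoreA ((pyProdA p.2).map (fun t => t.sum)))) = winCountB dice c := by
  simp only [lem_splitDiceA]
  rw [lem_winCountA, lem_winCountB]
  rfl

theorem lem_winB_nonneg (dice : List (List Int)) (c : List Int) : 0 ≤ winCountB dice c := by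
  rw [lem_winCountB]
  apply List.sum_nonneg
  intro x hx
  obtain ⟨m, _, hm⟩ := List.mem_map.mp hx
  rw [← hm]
  exact Int.natCast_nonneg _

theorem lem_run {α : Type} (f : α → Int) (l : List α) (b : Int × α) :
    (l.foldl (fun b c => if f c > b.1 then (f c, c) else b) b).1 = (l.map f).foldl max b.1
    ∧ (l.foldl (fun b c => if f c > b.1 then (f c, c) else b) b = b
       ∨ (b.1 < (l.foldl (fun b c => if f c > b.1 then (f c, c) else b) b).1
          ∧ ∃ pre x suf, l = pre ++ x :: suf
              ∧ (l.foldl (fun b c => if f c > b.1 then (f c, c) else b) b).2 = x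
              ∧ f x = (l.foldl (fun b c => if f c > b.1 then (f c, c) else b) b).1
              ∧ ∀ c ∈ pre, f c < (l.foldl (fun b c => if f c > b.1 then (f c, c) else b) b).1)) := by
  induction l generalizing b with
  | nil => exact ⟨rfl, Or.inl rfl⟩
  | cons y l ih =>
    by_cases hy : f y > b.1
    · have hstep : (y :: l).foldl (fun b c => if f c > b.1 then (f c, c) else b) b
          = l.foldl (fun b c => if f c > b.1 then (f c, c) else b) (f y, y) := by
        simp [hy]
      obtain ⟨ih1, ih2⟩ := ih (f y, y)
      constructor
      · rw [hstep, ih1]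
        simp [max_eq_right (le_of_lt hy)]
      · right
        rcases ih2 with heq | ⟨hlt, pre, x, suf, hl, h2, h3, h4⟩
        · refine ⟨?_, [], y, l, rfl, ?_, ?_, by simp⟩
          · rw [hstep, heq]; exact hy
          · rw [hstep, heq]
          · rw [hstep, heq]
        · refine ⟨?_, y :: pre, x, suf, by simp [hl], by rw [hstep]; exact h2,
            by rw [hstep]; exact h3, ?_⟩
          · rw [hstep]; exact lt_trans hy hlt
          · intro d hd
            rcases List.mem_cons.mp hd with hdy | hdp
            · rw [hstep, hdy]; exact hlt
            · rw [hstep]; exact h4 d hdp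
    · have hstep : (y :: l).foldl (fun b c => if f c > b.1 then (f c, c) else b) b
          = l.foldl (fun b c => if f c > b.1 then (f c, c) else b) b := by
        simp [hy]
      obtain ⟨ih1, ih2⟩ := ih b
      constructor
      · rw [hstep, ih1]
        simp [max_eq_left (not_lt.mp hy)]
      · rcases ih2 with heq | ⟨hlt, pre, x, suf, hl, h2, h3, h4⟩
        · left; rw [hstep]; exact heq
        · right
          refine ⟨by rw [hstep]; exact hlt, y :: pre, x, suf, by simp [hl],
            by rw [hstep]; exact h2, by rw [hstep]; exact h3, ?_⟩
          intro d hd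
          rcases List.mem_cons.mp hd with hdy | hdp
          · rw [hstep, hdy]
            exact lt_of_le_of_lt (not_lt.mp hy) hlt
          · rw [hstep]; exact h4 d hdp

theorem lem_comb_ne_nil (dice : List (List Int)) :
    PySem.List.combinations (PySem.List.pyRange 0 (dice.length : Int) 1) (dice.length / 2) ≠ [] := by
  intro hnil
  have hmem : (PySem.List.pyRange 0 (dice.length : Int) 1).take (dice.length / 2)
      ∈ PySem.List.combinations (PySem.List.pyRange 0 (dice.length : Int) 1) (dice.length / 2) := by
    rw [PySem.List.mem_combinations_iff]
    constructor
    · exact List.take_sublist _ _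
    · rw [List.length_take, PySem.List.length_pyRange_one]
      simp [Nat.div_le_self]
  rw [hnil] at hmem
  exact (List.not_mem_nil) hmem

theorem solution_eq_alt (dice : List (List Int)) : solution dice = solution_alt dice := by
  unfold solution solution_alt
  simp only [lem_winA_eq_winB]
  set comb := PySem.List.combinations (PySem.List.pyRange 0 (dice.length : Int) 1)
    (dice.length / 2) with hcomb
  obtain ⟨c0, rest, hc⟩ : ∃ c0 rest, comb = c0 :: rest := by
    cases h : comb with
    | nil =>
      have hne := lem_comb_ne_nil dice
      rw [← hcomb] at hne
      exact absurd h hne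
    | cons a t => exact ⟨a, t, rfl⟩
  obtain ⟨hr1, hr2⟩ := lem_run (fun c => winCountB dice c) comb (-1, ([] : List Int))
  set r := comb.foldl
    (fun b c => if (fun c => winCountB dice c) c > b.1 then ((fun c => winCountB dice c) c, c) else b)
    (-1, ([] : List Int)) with hrdef
  have hnn0 : (0 : Int) ≤ winCountB dice c0 := lem_winB_nonneg dice c0
  have hmax_val : (comb.map (fun c => winCountB dice c)).foldl max (-1)
      = (rest.map (fun c => winCountB dice c)).foldl max (winCountB dice c0) := by
    rw [hc, List.map_cons, List.foldl_cons, max_eq_right (by linarith)]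
  have hr1' : r.1 = (rest.map (fun c => winCountB dice c)).foldl max (winCountB dice c0) := by
    rw [hr1, hmax_val]
  have hmax : PySem.List.max? (comb.map (fun c => winCountB dice c)) (fun x => x) = some r.1 := by
    rw [hc, List.map_cons, PySem.List.max?_id_cons, hr1']
  have hr1pos : (0 : Int) ≤ r.1 := by
    rw [hr1']
    exact le_trans hnn0 (lem_le_foldl_max _ _)
  rcases hr2 with heq | ⟨hbl, pre, x, suf, hl, h2, h3, h4⟩
  · have : r.1 = -1 := by rw [heq]
    omega
  · have hnotmem : r.1 ∉ pre.map (fun c => winCountB dice c) := by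
      intro hm
      obtain ⟨d, hdmem, hfd⟩ := List.mem_map.mp hm
      exact absurd hfd (ne_of_lt (h4 d hdmem))
    have hidx : PySem.List.index? (comb.map (fun c => winCountB dice c)) r.1
        = some (pre.map (fun c => winCountB dice c)).length := by
      apply (PySem.List.index?_eq_some_iff _ _ _).mpr
      exact ⟨pre.map (fun c => winCountB dice c), suf.map (fun c => winCountB dice c),
        by rw [hl]; simp [h3], rfl, hnotmem⟩
    have hlen : (pre.map (fun c => winCountB dice c)).length = pre.length := List.length_map _
    have hget : PySem.List.pyGetD comb ((pre.length : Nat) : Int) [] = x := by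
      rw [PySem.List.pyGetD_natCast, hl]
      simp [List.getD]
    simp only [hmax, hidx, hlen, hget, h2]
-- ===== VERDICT (by name: the statement is the Claim_ definition above) =====
theorem solution_spec : Claim_equal_solution := by
  intro dice _
  unfold Spec_solution
  exact solution_eq_alt dice
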